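-- pv_equiv track=rewrite | github.com/cdvr1993/interviews | toptal/monkey-river/monkey-river.py | minimum_time_to_cross
-- ===== SOURCE A (Python) =====
-- def minimum_time_to_cross(stones, max_jump):
--     # It means it is not possible to reach the other side of the river
--     for i in range(len(stones) - max_jump, len(stones)):
--         if stones[i] != -1:
--             break
--     else:
--         return -1
--
--     def cross(time, start):
--         if start + max_jump >= len(stones):
--             return True
--
--         for index in range(start + 1, min(start + max_jump + 1, len(stones))):
--             if 0 <= stones[index] <= time and cross(time, index):
--                 return True
--         return False
--
--     time = 0
--
--     while True:
--         if cross(time, -1):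
--             return time
--         time += 1
-- ===== SOURCE B (Python) =====
-- def minimum_time_to_cross(stones, max_jump):
--     # Closed form: every crossing must land in each window of max_jump consecutive
--     # positions, so the minimal time is the maximum over all such windows of the
--     # window's minimal non-negative stone value (0 if the bank jump suffices).
--     # Window minima come from block prefix/suffix minima.
--     n = len(stones)
--     if max_jump <= 0:
--         return -1
--     if max_jump > n:
--         return 0
--     def f(j):
--         return stones[j] if stones[j] >= 0 else None
--     def mn(a, b):
--         if a is None:
--             return b
--         if b is None:
--             return a
--         return a if a <= b else b
--     pre = []
--     for j in range(n):
--         if j % max_jump == 0: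
--             pre.append(f(j))
--         else:
--             pre.append(mn(pre[j - 1], f(j)))
--     suf = [None] * n
--     for j in range(n - 1, -1, -1):
--         if j % max_jump == max_jump - 1 or j == n - 1:
--             suf[j] = f(j)
--         else:
--             suf[j] = mn(suf[j + 1], f(j))
--     ans = 0
--     for i in range(n - max_jump + 1):
--         w = mn(suf[i], pre[i + max_jump - 1])
--         if w is None:
--             return -1
--         if w > ans:
--             ans = w
--     return ans
-- ===== Notes on version B (the rewrite author's own statement) =====
-- stated objective: alternative
-- what changed: Replaces A's unbounded linear search over candidate times, each tested by a recursive backtracking reachability check, with a closed form: the answer is the maximum over all max_jump-wide windows of the window's minimal non-negative stone value, computed from block prefix/suffix minima in a fixed number of list passes.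
-- intended difference: When len(stones)+1 <= max_jump <= 2*len(stones) and every stone is -1, A's pre-check scans the whole list via negative-index wraparound and returns -1 even though one jump from bank to bank crosses directly; B returns the intended 0. — e.g. on minimum_time_to_cross([-1], 2): A returns -1, B returns 0
import Mathlib
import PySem

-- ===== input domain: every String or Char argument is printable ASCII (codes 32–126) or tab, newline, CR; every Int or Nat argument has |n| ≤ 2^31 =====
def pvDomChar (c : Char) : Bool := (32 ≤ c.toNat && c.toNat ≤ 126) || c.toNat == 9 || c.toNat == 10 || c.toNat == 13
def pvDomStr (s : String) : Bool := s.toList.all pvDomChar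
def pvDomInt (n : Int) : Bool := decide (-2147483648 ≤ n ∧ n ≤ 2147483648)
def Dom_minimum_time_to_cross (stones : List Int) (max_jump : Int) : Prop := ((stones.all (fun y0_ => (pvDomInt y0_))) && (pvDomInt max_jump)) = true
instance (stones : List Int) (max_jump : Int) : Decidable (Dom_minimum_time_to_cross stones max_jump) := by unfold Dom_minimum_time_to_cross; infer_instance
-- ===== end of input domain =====

-- B computes the answer in closed form — the maximum over all max_jump-wide windows of the
-- window's minimal steppable stone value, via block prefix/suffix minima — instead of A's
-- unbounded search over candidate times, each tested by recursive backtracking. A's while-loop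
-- is ported with a fuel guard that is provably sufficient on Pre_ (the answer never exceeds
-- the maximal stone value).

-- ===== PORT A =====

-- the recursive `cross(time, start)`; `fuel` only makes the recursion structural (depth ≤ n - start)
def pvCrossA (stones : List Int) (mj t : Int) : Nat → Int → Bool
  | 0, _ => false
  | fuel + 1, start =>
    if (stones.length : Int) ≤ start + mj then true
    else
      (PySem.List.pyRange (start + 1) (min (start + mj + 1) (stones.length : Int)) 1).any
        (fun idx =>
          match PySem.List.pyGet? stones idx with
          | some v => decide (0 ≤ v) && decide (v ≤ t) && pvCrossA stones mj t fuel idx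
          | none => false)

-- the `while True: if cross(time, -1): return time; time += 1` loop; the budget is a fuel guard
def pvLoopA (stones : List Int) (mj : Int) : Nat → Int → Int
  | 0, _ => -1
  | b + 1, t =>
    if pvCrossA stones mj t (stones.length + 2) (-1) then t else pvLoopA stones mj b (t + 1)

def minimum_time_to_cross (stones : List Int) (max_jump : Int) : Int :=
  -- the for-else pre-check over stones[len-mj .. len-1] (negative indices wrap, as in Python)
  if (PySem.List.pyRange ((stones.length : Int) - max_jump) (stones.length : Int) 1).all
       (fun i => PySem.List.pyGet? stones i == some (-1))
  then -1
  else pvLoopA stones max_jump ((stones.foldl (fun a v => max a v) 0).toNat + 2) 0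

-- ===== PORT B =====

-- f(j): the stone value if non-negative (steppable), else None (= +infinity)
def pvF (stones : List Int) (j : Nat) : Option Int :=
  if 0 ≤ stones.getD j 0 then some (stones.getD j 0) else none

-- None-aware minimum (None = +infinity), Source B's `mn`
def pvMn (a b : Option Int) : Option Int :=
  match a with
  | none => b
  | some av =>
    match b with
    | none => a
    | some bv => if av ≤ bv then a else b

-- prefix minima of f within blocks of size max_jump (Source B's `pre` loop)
def pvPreList (stones : List Int) (mjn : Nat) : List (Option Int) :=
  (List.range stones.length).foldl
    (fun pre j =>
      if j % mjn == 0 then pre ++ [pvF stones j]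
      else pre ++ [pvMn (pre.getD (j - 1) none) (pvF stones j)])
    []

-- suffix minima of f within blocks (Source B's `suf` loop, j from n-1 down to 0, built by prepending)
def pvSufList (stones : List Int) (mjn : Nat) : List (Option Int) :=
  (List.range stones.length).reverse.foldl
    (fun suf j =>
      if j % mjn == mjn - 1 || j == stones.length - 1 then pvF stones j :: suf
      else pvMn (suf.getD 0 none) (pvF stones j) :: suf)
    []

-- Source B's final loop: max of window minima, -1 as soon as a window has no steppable stone
def pvAnsLoop (mjn : Nat) (pre suf : List (Option Int)) : List Nat → Int → Int
  | [], ans => ans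
  | i :: rest, ans =>
    match pvMn (suf.getD i none) (pre.getD (i + mjn - 1) none) with
    | none => -1
    | some w => pvAnsLoop mjn pre suf rest (if ans < w then w else ans)

def minimum_time_to_cross_alt (stones : List Int) (max_jump : Int) : Int :=
  if max_jump ≤ 0 then -1
  else if (stones.length : Int) < max_jump then 0
  else
    pvAnsLoop max_jump.toNat (pvPreList stones max_jump.toNat) (pvSufList stones max_jump.toNat)
      (List.range (stones.length - max_jump.toNat + 1)) 0

-- the river is crossable: no block of max_jump consecutive indices all holding negative stones
def pvCrossable (stones : List Int) (mj : Int) : Prop :=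
  ∀ i ∈ List.range stones.length, (i : Int) + mj ≤ (stones.length : Int) →
    ∃ j ∈ List.range stones.length, i ≤ j ∧ (j : Int) < (i : Int) + mj ∧ 0 ≤ stones.getD j 0

-- the last max_jump stones are all -1 (A's for-else pre-check succeeds; only used for mj ≤ len)
def pvWindowNeg1 (stones : List Int) (mj : Int) : Prop :=
  ∀ j ∈ List.range stones.length,
    (stones.length : Int) - mj ≤ (j : Int) → stones.getD j 0 = -1

-- Pre_ excludes exactly the inputs where A never returns: IndexError in the pre-check
-- (stones empty with max_jump ≥ 1, or max_jump > 2*len, where the first index is below -len)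
-- and divergence of the while-loop (river not crossable while the pre-check window is not all -1).
def Pre_minimum_time_to_cross (stones : List Int) (max_jump : Int) : Prop :=
  max_jump ≤ 0 ∨
    (1 ≤ max_jump ∧ stones ≠ [] ∧ max_jump ≤ 2 * (stones.length : Int) ∧
      (pvCrossable stones max_jump ∨ pvWindowNeg1 stones max_jump))

instance (stones : List Int) (max_jump : Int) : Decidable (Pre_minimum_time_to_cross stones max_jump) := by
  unfold Pre_minimum_time_to_cross pvCrossable pvWindowNeg1; infer_instance

def pvWitness_minimum_time_to_cross : List Int × Int := ([0, -1, 3], 2)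

-- When len(stones)+1 ≤ max_jump ≤ 2*len(stones) and every stone is -1, A's pre-check scans the
-- whole list via negative-index wraparound and returns -1 although the bank-to-bank jump crosses
-- directly; B returns the intended 0.
def D_minimum_time_to_cross (stones : List Int) (max_jump : Int) : Prop :=
  stones ≠ [] ∧ (stones.length : Int) + 1 ≤ max_jump ∧
    max_jump ≤ 2 * (stones.length : Int) ∧ ∀ v ∈ stones, v = -1

instance (stones : List Int) (max_jump : Int) : Decidable (D_minimum_time_to_cross stones max_jump) := by
  unfold D_minimum_time_to_cross; infer_instance

def Spec_minimum_time_to_cross (stones : List Int) (max_jump : Int) (out : Int) : Prop :=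
  ¬ D_minimum_time_to_cross stones max_jump → out = minimum_time_to_cross_alt stones max_jump
instance (stones : List Int) (max_jump : Int) (out : Int) : Decidable (Spec_minimum_time_to_cross stones max_jump out) := by unfold Spec_minimum_time_to_cross; infer_instance

def pvDiffWitness_minimum_time_to_cross : List Int × Int := ([-1], 2)
def pvDiffWitnessOut_minimum_time_to_cross : Int × Int := (-1, 0)

-- ===== CLAIM (what is proved, stated in full; the proofs are below) =====
def Claim_unchanged_minimum_time_to_cross : Prop := ∀ (stones : List Int) (max_jump : Int), Dom_minimum_time_to_cross stones max_jump → Pre_minimum_time_to_cross stones max_jump → Spec_minimum_time_to_cross stones max_jump (minimum_time_to_cross stones max_jump)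
def Claim_changed_minimum_time_to_cross : Prop := Dom_minimum_time_to_cross (pvDiffWitness_minimum_time_to_cross.1) (pvDiffWitness_minimum_time_to_cross.2) ∧ Pre_minimum_time_to_cross (pvDiffWitness_minimum_time_to_cross.1) (pvDiffWitness_minimum_time_to_cross.2) ∧ D_minimum_time_to_cross (pvDiffWitness_minimum_time_to_cross.1) (pvDiffWitness_minimum_time_to_cross.2) ∧ minimum_time_to_cross (pvDiffWitness_minimum_time_to_cross.1) (pvDiffWitness_minimum_time_to_cross.2) = pvDiffWitnessOut_minimum_time_to_cross.1 ∧ minimum_time_to_cross_alt (pvDiffWitness_minimum_time_to_cross.1) (pvDiffWitness_minimum_time_to_cross.2) = pvDiffWitnessOut_minimum_time_to_cross.2 ∧ pvDiffWitnessOut_minimum_time_to_cross.1 ≠ pvDiffWitnessOut_minimum_time_to_cross.2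
def Claim_exact_minimum_time_to_cross : Prop := ∀ (stones : List Int) (max_jump : Int), Dom_minimum_time_to_cross stones max_jump → Pre_minimum_time_to_cross stones max_jump → D_minimum_time_to_cross stones max_jump → minimum_time_to_cross stones max_jump ≠ minimum_time_to_cross_alt stones max_jump

-- ===== LEMMAS AND PROOFS =====


-- reachable stone positions (p = -1 is the bank) using stones of value ≤ t
inductive pvRI (stones : List Int) (mj t : Int) : Int → Prop
  | start : pvRI stones mj t (-1)
  | step {p i v : Int} : pvRI stones mj t p → p + 1 ≤ i → i ≤ p + mj →
      PySem.List.pyGet? stones i = some v → 0 ≤ v → v ≤ t → pvRI stones mj t i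

-- positions from which the far bank can be reached
inductive pvSuf (stones : List Int) (mj t : Int) : Int → Prop
  | done {s : Int} : (stones.length : Int) ≤ s + mj → pvSuf stones mj t s
  | step {s i v : Int} : s + 1 ≤ i → i ≤ s + mj → i < (stones.length : Int) →
      PySem.List.pyGet? stones i = some v → 0 ≤ v → v ≤ t →
      pvSuf stones mj t i → pvSuf stones mj t s

def pvGoal (stones : List Int) (mj t : Int) : Prop :=
  ∃ p, pvRI stones mj t p ∧ (stones.length : Int) ≤ p + mj

theorem pvRI_ge {stones : List Int} {mj t p : Int} (h : pvRI stones mj t p) : -1 ≤ p := by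
  induction h with
  | start => exact le_refl _
  | step _ h1 _ _ _ _ ih => omega

theorem pvGet_lt {stones : List Int} {i v : Int} (h0 : 0 ≤ i)
    (h : PySem.List.pyGet? stones i = some v) : i < (stones.length : Int) := by
  rw [PySem.List.pyGet?_of_nonneg stones h0] at h
  obtain ⟨hlt, -⟩ := List.getElem?_eq_some_iff.mp h
  omega

theorem pvRI_inv {stones : List Int} {mj t i : Int} (h : pvRI stones mj t i) (hi : i ≠ -1) :
    ∃ v, PySem.List.pyGet? stones i = some v ∧ 0 ≤ v ∧ v ≤ t ∧
      ∃ p, pvRI stones mj t p ∧ p + 1 ≤ i ∧ i ≤ p + mj := by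
  cases h with
  | start => exact absurd rfl hi
  | step hp h1 h2 hv h0 ht => exact ⟨_, hv, h0, ht, _, hp, h1, h2⟩

theorem pvCrossA_iff (stones : List Int) (mj t : Int) :
    ∀ (fuel : Nat) (start : Int), -1 ≤ start → start < (stones.length : Int) →
      (stones.length : Int) ≤ start + (fuel : Int) →
      (pvCrossA stones mj t fuel start = true ↔ pvSuf stones mj t start) := by
  intro fuel
  induction fuel with
  | zero => intro start h1 h2 h3; simp only [Nat.cast_zero, add_zero] at h3; omega
  | succ fuel ih =>
    intro start h1 h2 h3
    by_cases hg : (stones.length : Int) ≤ start + mj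
    · simp only [pvCrossA, if_pos hg]
      exact ⟨fun _ => pvSuf.done hg, fun _ => by simp⟩
    · simp only [pvCrossA, if_neg hg, List.any_eq_true]
      constructor
      · rintro ⟨idx, hmem, hx⟩
        rw [PySem.List.mem_pyRange_one] at hmem
        obtain ⟨hlo, hhi⟩ := hmem
        have hhi' := lt_min_iff.mp hhi
        cases hv : PySem.List.pyGet? stones idx with
        | none => rw [hv] at hx; simp at hx
        | some v =>
          rw [hv] at hx
          simp only [Bool.and_eq_true, decide_eq_true_eq] at hx
          have hsuf := (ih idx (by omega) (by omega)
            (by push_cast at h3 ⊢; omega)).mp hx.2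
          exact pvSuf.step hlo (by omega) (by omega) hv hx.1.1 hx.1.2 hsuf
      · intro hs
        cases hs with
        | done h => exact absurd h hg
        | step hlo hhi hlt hv h0 ht hsuf =>
          refine ⟨_, PySem.List.mem_pyRange_one.mpr ⟨hlo, lt_min_iff.mpr ⟨by omega, hlt⟩⟩, ?_⟩
          rw [hv]
          simp only [Bool.and_eq_true, decide_eq_true_eq]
          exact ⟨⟨h0, ht⟩, (ih _ (by omega) hlt (by push_cast at h3 ⊢; omega)).mpr hsuf⟩

theorem pvSuf_neg_one_iff (stones : List Int) (mj t : Int) :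
    pvSuf stones mj t (-1) ↔ pvGoal stones mj t := by
  constructor
  · intro h
    have aux : ∀ s, pvSuf stones mj t s → pvRI stones mj t s → pvGoal stones mj t := by
      intro s hs
      induction hs with
      | done h => intro hri; exact ⟨_, hri, h⟩
      | step hlo hhi hlt hv h0 ht _ ih =>
        intro hri; exact ih (pvRI.step hri hlo hhi hv h0 ht)
    exact aux _ h pvRI.start
  · rintro ⟨p, hri, hp⟩
    have aux : ∀ q, pvRI stones mj t q → pvSuf stones mj t q → pvSuf stones mj t (-1) := by
      intro q hq
      induction hq with
      | start => exact id
      | step hp' hlo hhi hv h0 ht ih =>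
        intro hsuf
        exact ih (pvSuf.step hlo hhi (pvGet_lt (by have := pvRI_ge hp'; omega) hv) hv h0 ht hsuf)
    exact aux p hri (pvSuf.done hp)

-- option "≤ T" predicate (None = +infinity)
def pvLE (o : Option Int) (T : Int) : Prop := ∃ v, o = some v ∧ v ≤ T

-- stone k is steppable at time T
def pvOK (stones : List Int) (k : Nat) (T : Int) : Prop :=
  0 ≤ stones.getD k 0 ∧ stones.getD k 0 ≤ T

-- the window of max_jump positions starting at i holds a stone steppable at time T
def pvWin (stones : List Int) (mjn i : Nat) (T : Int) : Prop :=
  ∃ k, i ≤ k ∧ k < i + mjn ∧ k < stones.length ∧ pvOK stones k T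

-- every `some` entry is a non-negative stone value (used to bound the answer)
def pvValOf (stones : List Int) (o : Option Int) : Prop :=
  ∀ v, o = some v → 0 ≤ v ∧ ∃ k, k < stones.length ∧ v = stones.getD k 0

theorem pvMn_le {a b : Option Int} {T : Int} :
    pvLE (pvMn a b) T ↔ pvLE a T ∨ pvLE b T := by
  cases a with
  | none => simp [pvMn, pvLE]
  | some av =>
    cases b with
    | none => simp [pvMn, pvLE]
    | some bv =>
      simp only [pvMn]
      split_ifs with h <;> simp [pvLE] <;> omega

theorem pvMn_cases (a b : Option Int) : pvMn a b = a ∨ pvMn a b = b := by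
  cases a with
  | none => exact Or.inr rfl
  | some av =>
    cases b with
    | none => exact Or.inl rfl
    | some bv =>
      simp only [pvMn]
      split_ifs
      · exact Or.inl rfl
      · exact Or.inr rfl

theorem pvF_le (stones : List Int) (k : Nat) (T : Int) :
    pvLE (pvF stones k) T ↔ pvOK stones k T := by
  simp only [pvF, pvOK]
  split_ifs with h
  · constructor
    · rintro ⟨v, hv, hle⟩
      injection hv with hv
      exact ⟨h, hv ▸ hle⟩
    · rintro ⟨-, hle⟩
      exact ⟨_, rfl, hle⟩
  · constructor
    · rintro ⟨v, hv, -⟩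
      exact absurd hv (by simp)
    · rintro ⟨h0, -⟩
      exact absurd h0 h

theorem pvF_valOf (stones : List Int) (k : Nat) (hk : k < stones.length) :
    pvValOf stones (pvF stones k) := by
  intro v hv
  simp only [pvF] at hv
  split_ifs at hv with h
  · injection hv with hv
    exact ⟨hv ▸ h, k, hk, hv.symm⟩

theorem pvPreList_spec (stones : List Int) (mjn : Nat) (h1 : 1 ≤ mjn) :
    (pvPreList stones mjn).length = stones.length ∧
    ∀ j, j < stones.length →
      ((∀ T, pvLE ((pvPreList stones mjn).getD j none) T ↔
          ∃ k, j - j % mjn ≤ k ∧ k ≤ j ∧ pvOK stones k T) ∧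
        pvValOf stones ((pvPreList stones mjn).getD j none)) := by
  have hstable : ∀ (L : List (Option Int)) (x : Option Int) (j : Nat), j < L.length →
      (L ++ [x]).getD j none = L.getD j none := by
    intro L x j hj
    rw [List.getD_eq_getElem?_getD, List.getElem?_append_left hj, ← List.getD_eq_getElem?_getD]
  have hlast : ∀ (L : List (Option Int)) (x : Option Int),
      (L ++ [x]).getD L.length none = x := by
    intro L x
    rw [List.getD_eq_getElem?_getD, List.getElem?_append_right (le_refl _)]
    simp
  have key : ∀ m, m ≤ stones.length →
      (((List.range m).foldl
        (fun pre j =>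
          if j % mjn == 0 then pre ++ [pvF stones j]
          else pre ++ [pvMn (pre.getD (j - 1) none) (pvF stones j)]) []).length = m ∧
      ∀ j, j < m →
        ((∀ T, pvLE (((List.range m).foldl
            (fun pre j =>
              if j % mjn == 0 then pre ++ [pvF stones j]
              else pre ++ [pvMn (pre.getD (j - 1) none) (pvF stones j)]) []).getD j none) T ↔
            ∃ k, j - j % mjn ≤ k ∧ k ≤ j ∧ pvOK stones k T) ∧
          pvValOf stones (((List.range m).foldl
            (fun pre j =>
              if j % mjn == 0 then pre ++ [pvF stones j]
              else pre ++ [pvMn (pre.getD (j - 1) none) (pvF stones j)]) []).getD j none))) := by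
    intro m
    induction m with
    | zero => intro _; exact ⟨rfl, by omega⟩
    | succ m ih =>
      intro hm
      obtain ⟨ihlen, ihchar⟩ := ih (by omega)
      rw [List.range_succ, List.foldl_append, List.foldl_cons, List.foldl_nil]
      set Lm := (List.range m).foldl
        (fun pre j =>
          if j % mjn == 0 then pre ++ [pvF stones j]
          else pre ++ [pvMn (pre.getD (j - 1) none) (pvF stones j)]) [] with hLm
      have hentry : ∀ (e : Option Int), (Lm ++ [e]).getD m none = e := by
        intro e
        have := hlast Lm e
        rw [ihlen] at this
        exact this
      by_cases hb : m % mjn = 0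
      · rw [if_pos (by simpa using hb)]
        refine ⟨by simp [ihlen], ?_⟩
        intro j hj
        by_cases hjm : j < m
        · rw [hstable Lm _ j (by omega)]
          exact ihchar j hjm
        · have hjeq : j = m := by omega
          subst hjeq
          rw [hentry]
          constructor
          · intro T
            rw [pvF_le]
            constructor
            · intro h; exact ⟨j, by omega, le_refl _, h⟩
            · rintro ⟨k, hk1, hk2, hOK⟩
              have : k = j := by omega
              exact this ▸ hOK
          · exact pvF_valOf stones j (by omega)
      · rw [if_neg (by simpa using hb)]
        have hm1 : 1 ≤ m := by
          by_contra h
          have : m = 0 := by omega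
          subst this
          simp at hb
        have hs : m % mjn < mjn := Nat.mod_lt _ (by omega)
        have hdm : mjn * (m / mjn) + m % mjn = m := Nat.div_add_mod m mjn
        have hmod : (m - 1) % mjn = m % mjn - 1 := by
          have he : m - 1 = mjn * (m / mjn) + (m % mjn - 1) := by omega
          rw [he, Nat.mul_add_mod]
          exact Nat.mod_eq_of_lt (by omega)
        refine ⟨by simp [ihlen], ?_⟩
        intro j hj
        by_cases hjm : j < m
        · rw [hstable Lm _ j (by omega)]
          exact ihchar j hjm
        · have hjeq : j = m := by omega
          subst hjeq
          rw [hentry]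
          have hprev := ihchar (j - 1) (by omega)
          constructor
          · intro T
            rw [pvMn_le, pvF_le, hprev.1 T]
            constructor
            · rintro (⟨k, hk1, hk2, hOK⟩ | hOK)
              · exact ⟨k, by omega, by omega, hOK⟩
              · exact ⟨j, by omega, le_refl _, hOK⟩
            · rintro ⟨k, hk1, hk2, hOK⟩
              by_cases hkj : k = j
              · exact Or.inr (hkj ▸ hOK)
              · exact Or.inl ⟨k, by omega, by omega, hOK⟩
          · intro v hv
            rcases pvMn_cases (Lm.getD (j - 1) none) (pvF stones j) with hc | hc
            · rw [hc] at hv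
              exact hprev.2 v hv
            · rw [hc] at hv
              exact pvF_valOf stones j (by omega) v hv
  exact key stones.length (le_refl _)

-- block-suffix end covered by suf[j]
def pvE (stones : List Int) (mjn j : Nat) : Nat :=
  min (j + (mjn - 1 - j % mjn)) (stones.length - 1)

theorem pvSufList_spec (stones : List Int) (mjn : Nat) (h1 : 1 ≤ mjn) :
    (pvSufList stones mjn).length = stones.length ∧
    ∀ j, j < stones.length →
      ((∀ T, pvLE ((pvSufList stones mjn).getD j none) T ↔
          ∃ k, j ≤ k ∧ k ≤ pvE stones mjn j ∧ pvOK stones k T) ∧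
        pvValOf stones ((pvSufList stones mjn).getD j none)) := by
  set step := fun (suf : List (Option Int)) (j : Nat) =>
    if j % mjn == mjn - 1 || j == stones.length - 1 then pvF stones j :: suf
    else pvMn (suf.getD 0 none) (pvF stones j) :: suf with hstep
  have key : ∀ m (acc : List (Option Int)), m ≤ stones.length →
      acc.length = stones.length - m →
      (∀ d, d < acc.length →
        ((∀ T, pvLE (acc.getD d none) T ↔
            ∃ k, m + d ≤ k ∧ k ≤ pvE stones mjn (m + d) ∧ pvOK stones k T) ∧
          pvValOf stones (acc.getD d none))) →
      (((List.range m).reverse.foldl step acc).length = stones.length ∧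
      ∀ j, j < stones.length →
        ((∀ T, pvLE (((List.range m).reverse.foldl step acc).getD j none) T ↔
            ∃ k, j ≤ k ∧ k ≤ pvE stones mjn j ∧ pvOK stones k T) ∧
          pvValOf stones (((List.range m).reverse.foldl step acc).getD j none))) := by
    intro m
    induction m with
    | zero =>
      intro acc _ hlen hchar
      simp only [List.range_zero, List.reverse_nil, List.foldl_nil]
      exact ⟨by omega, fun j hj => by simpa using hchar j (by omega)⟩
    | succ m ih =>
      intro acc hm hlen hchar
      have hrev : (List.range (m + 1)).reverse = m :: (List.range m).reverse := by
        rw [List.range_succ, List.reverse_append]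
        rfl
      rw [hrev, List.foldl_cons]
      have hmn : m < stones.length := by omega
      -- the new head entry satisfies the suffix characterization at index m
      have hEm : m ≤ pvE stones mjn m := by
        simp only [pvE]
        omega
      have hmain : ((∀ T, pvLE ((step acc m).getD 0 none) T ↔
            ∃ k, m ≤ k ∧ k ≤ pvE stones mjn m ∧ pvOK stones k T) ∧
          pvValOf stones ((step acc m).getD 0 none)) ∧
          ∃ e, step acc m = e :: acc := by
        simp only [hstep]
        by_cases hb : m % mjn = mjn - 1 ∨ m = stones.length - 1
        · rw [if_pos (by simpa using hb)]
          have hEeq : pvE stones mjn m = m := by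
            simp only [pvE]
            rcases hb with hb | hb <;> omega
          refine ⟨⟨?_, by simpa using pvF_valOf stones m hmn⟩, _, rfl⟩
          intro T
          simp only [List.getD_cons_zero]
          rw [pvF_le, hEeq]
          constructor
          · intro h; exact ⟨m, le_refl _, le_refl _, h⟩
          · rintro ⟨k, hk1, hk2, hOK⟩
            have : k = m := by omega
            exact this ▸ hOK
        · rw [if_neg (by simpa using hb)]
          push Not at hb
          obtain ⟨hb1, hb2⟩ := hb
          have hs : m % mjn < mjn := Nat.mod_lt _ (by omega)
          have hdm : mjn * (m / mjn) + m % mjn = m := Nat.div_add_mod m mjn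
          have hmod : (m + 1) % mjn = m % mjn + 1 := by
            have he : m + 1 = mjn * (m / mjn) + (m % mjn + 1) := by omega
            rw [he, Nat.mul_add_mod]
            exact Nat.mod_eq_of_lt (by omega)
          have hEeq : pvE stones mjn (m + 1) = pvE stones mjn m := by
            simp only [pvE, hmod]
            omega
          have hacc0 : 0 < acc.length := by omega
          have hnext := hchar 0 hacc0
          rw [Nat.add_zero] at hnext
          refine ⟨⟨?_, ?_⟩, _, rfl⟩
          · intro T
            simp only [List.getD_cons_zero]
            rw [pvMn_le, pvF_le, hnext.1 T, hEeq]
            constructor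
            · rintro (⟨k, hk1, hk2, hOK⟩ | hOK)
              · exact ⟨k, by omega, hk2, hOK⟩
              · exact ⟨m, le_refl _, hEm, hOK⟩
            · rintro ⟨k, hk1, hk2, hOK⟩
              by_cases hkm : k = m
              · exact Or.inr (hkm ▸ hOK)
              · exact Or.inl ⟨k, by omega, hk2, hOK⟩
          · simp only [List.getD_cons_zero]
            intro v hv
            rcases pvMn_cases (acc.getD 0 none) (pvF stones m) with hc | hc
            · rw [hc] at hv
              exact hnext.2 v hv
            · rw [hc] at hv
              exact pvF_valOf stones m hmn v hv
      obtain ⟨hm0, e, he⟩ := hmain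
      apply ih (step acc m) (by omega) (by rw [he]; simp; omega)
      intro d hd
      cases d with
      | zero => simpa using hm0
      | succ d =>
        rw [he] at hd ⊢
        simp only [List.getD_cons_succ]
        simp only [List.length_cons] at hd
        have := hchar d (by omega)
        have harith : m + 1 + d = m + (d + 1) := by omega
        rw [← harith]
        exact this
  have := key stones.length [] (le_refl _) (by simp) (by intro d hd; simp at hd)
  exact this

-- any reachability chain lands in every window of max_jump positions it passes
theorem pvRI_hits (stones : List Int) {mj T p : Int} (h1 : 1 ≤ mj)
    (h : pvRI stones mj T p) :
    ∀ i : Nat, (i : Int) ≤ p → pvWin stones mj.toNat i T := by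
  induction h with
  | start => intro i hi; exfalso; omega
  | step hp hlo hhi hv h0 ht ih =>
    rename_i q i v
    intro i0 hi0
    by_cases hc : (i0 : Int) ≤ q
    · exact ih i0 hc
    · have hipos : 0 ≤ i := by have := pvRI_ge hp; omega
      have hilt : i < (stones.length : Int) := pvGet_lt hipos hv
      have hcast : ((i.toNat : Nat) : Int) = i := Int.toNat_of_nonneg hipos
      have h1' : stones[i.toNat]? = some v := by
        rw [← PySem.List.pyGet?_natCast, hcast, hv]
      have h2' : stones.getD i.toNat 0 = v := by
        rw [List.getD_eq_getElem?_getD, h1']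
        rfl
      have hOK : pvOK stones i.toNat T := by
        constructor
        · rw [h2']; exact h0
        · rw [h2']; exact ht
      exact ⟨i.toNat, by omega, by omega, by omega, hOK⟩

-- if every full window holds a steppable stone, the river can be crossed (greedy chain)
theorem pvWin_goal (stones : List Int) (mj M : Int) (h1 : 1 ≤ mj)
    (hC : ∀ i : Nat, (i : Int) + mj ≤ (stones.length : Int) → pvWin stones mj.toNat i M) :
    ∀ (k : Nat) (p : Int), -1 ≤ p → pvRI stones mj M p →
      (stones.length : Int) ≤ p + mj + k → pvGoal stones mj M := by
  intro k
  induction k with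
  | zero => intro p hp hri h; exact ⟨p, hri, by push_cast at h; omega⟩
  | succ k ih =>
    intro p hp hri h
    by_cases hg : (stones.length : Int) ≤ p + mj
    · exact ⟨p, hri, hg⟩
    · have hi : ((p + 1).toNat : Int) = p + 1 := by omega
      obtain ⟨j, hij, hjlt, hjn, hj0, hjM⟩ := hC (p + 1).toNat (by omega)
      have hget : PySem.List.pyGet? stones (j : Int) = some stones[j] :=
        PySem.List.pyGet?_eq_some_getElem stones (by omega) (by omega) |>.trans (by simp)
      have hgd : stones.getD j 0 = stones[j] := List.getD_eq_getElem stones 0 hjn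
      have hri' : pvRI stones mj M (j : Int) :=
        pvRI.step hri (by omega) (by omega) hget (by rw [← hgd]; exact hj0)
          (by rw [← hgd]; exact hjM)
      exact ih (j : Int) (by omega) hri' (by push_cast at h ⊢; omega)

-- the window minimum at i: combine the block suffix at i with the block prefix at i+mj-1
theorem pvWm_iff (stones : List Int) (mjn : Nat) (h1 : 1 ≤ mjn) (i : Nat)
    (hw : i + mjn ≤ stones.length) :
    ∀ T, pvLE (pvMn ((pvSufList stones mjn).getD i none)
        ((pvPreList stones mjn).getD (i + mjn - 1) none)) T ↔ pvWin stones mjn i T := by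
  obtain ⟨hplen, hpre⟩ := pvPreList_spec stones mjn h1
  obtain ⟨hslen, hsuf⟩ := pvSufList_spec stones mjn h1
  intro T
  rw [pvMn_le, (hsuf i (by omega)).1 T, (hpre (i + mjn - 1) (by omega)).1 T]
  have hs : i % mjn < mjn := Nat.mod_lt _ (by omega)
  have hrlt : (i + mjn - 1) % mjn < mjn := Nat.mod_lt _ (by omega)
  have hs1 : (i + mjn) % mjn = i % mjn := Nat.add_mod_right i mjn
  have hs2 : (i + mjn) % mjn = ((i + mjn - 1) % mjn + 1 + mjn * ((i + mjn - 1) / mjn)) % mjn := by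
    congr 1
    have := Nat.div_add_mod (i + mjn - 1) mjn
    omega
  have hge : i % mjn ≤ (i + mjn - 1) % mjn + 1 := by
    have h3 : ((i + mjn - 1) % mjn + 1 + mjn * ((i + mjn - 1) / mjn)) % mjn
        = ((i + mjn - 1) % mjn + 1) % mjn := Nat.add_mul_mod_self_left _ _ _
    have h4 : ((i + mjn - 1) % mjn + 1) % mjn ≤ (i + mjn - 1) % mjn + 1 := Nat.mod_le _ _
    omega
  simp only [pvWin, pvE]
  constructor
  · rintro (⟨k, hk1, hk2, hOK⟩ | ⟨k, hk1, hk2, hOK⟩)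
    · exact ⟨k, by omega, by omega, by omega, hOK⟩
    · exact ⟨k, by omega, by omega, by omega, hOK⟩
  · rintro ⟨k, hk1, hk2, hk3, hOK⟩
    by_cases hcase : k ≤ i + (mjn - 1 - i % mjn)
    · exact Or.inl ⟨k, by omega, by omega, hOK⟩
    · exact Or.inr ⟨k, by omega, by omega, hOK⟩

-- the final loop returns -1 as soon as some listed window has no steppable stone
theorem pvAnsLoop_none (mjn : Nat) (pre suf : List (Option Int)) :
    ∀ (idxs : List Nat) (ans : Int),
      (∃ i ∈ idxs, pvMn (suf.getD i none) (pre.getD (i + mjn - 1) none) = none) →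
      pvAnsLoop mjn pre suf idxs ans = -1 := by
  intro idxs
  induction idxs with
  | nil => rintro ans ⟨i, hi, -⟩; simp at hi
  | cons i rest ih =>
    rintro ans ⟨i', hi', hnone⟩
    simp only [pvAnsLoop]
    rcases List.mem_cons.mp hi' with rfl | hi'
    · rw [hnone]
    · cases hmv : pvMn (suf.getD i none) (pre.getD (i + mjn - 1) none) with
      | none => rfl
      | some w => exact ih _ ⟨i', hi', hnone⟩

-- the final loop computes the maximum of the window minima (all present)
theorem pvAnsLoop_spec (mjn : Nat) (pre suf : List (Option Int)) :
    ∀ (idxs : List Nat) (ans : Int),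
      (∀ i ∈ idxs, pvMn (suf.getD i none) (pre.getD (i + mjn - 1) none) ≠ none) →
      (ans ≤ pvAnsLoop mjn pre suf idxs ans ∧
        (pvAnsLoop mjn pre suf idxs ans = ans ∨ ∃ i ∈ idxs,
          pvMn (suf.getD i none) (pre.getD (i + mjn - 1) none) =
            some (pvAnsLoop mjn pre suf idxs ans)) ∧
        (∀ i ∈ idxs, pvLE (pvMn (suf.getD i none) (pre.getD (i + mjn - 1) none))
          (pvAnsLoop mjn pre suf idxs ans)) ∧
        (∀ T, ans ≤ T →
          (∀ i ∈ idxs, pvLE (pvMn (suf.getD i none) (pre.getD (i + mjn - 1) none)) T) →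
          pvAnsLoop mjn pre suf idxs ans ≤ T)) := by
  intro idxs
  induction idxs with
  | nil =>
    intro ans _
    refine ⟨le_refl _, Or.inl rfl, by simp, ?_⟩
    intro T hT _
    simpa [pvAnsLoop] using hT
  | cons i rest ih =>
    intro ans hsome
    cases hmv : pvMn (suf.getD i none) (pre.getD (i + mjn - 1) none) with
    | none => exact absurd hmv (hsome i List.mem_cons_self)
    | some w =>
      have hrest : ∀ i' ∈ rest, pvMn (suf.getD i' none) (pre.getD (i' + mjn - 1) none) ≠ none :=
        fun i' hi' => hsome i' (List.mem_cons_of_mem _ hi')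
      obtain ⟨ih1, ih2, ih3, ih4⟩ := ih (if ans < w then w else ans) hrest
      have hstep : pvAnsLoop mjn pre suf (i :: rest) ans =
          pvAnsLoop mjn pre suf rest (if ans < w then w else ans) := by
        simp only [pvAnsLoop, hmv]
      rw [hstep]
      have hans' : ans ≤ (if ans < w then w else ans) := by split_ifs <;> omega
      have hwle : w ≤ (if ans < w then w else ans) := by split_ifs <;> omega
      refine ⟨by omega, ?_, ?_, ?_⟩
      · rcases ih2 with h | ⟨i', hi', h⟩
        · rw [h]
          split_ifs with hc
          · exact Or.inr ⟨i, List.mem_cons_self, by rw [hmv]⟩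
          · exact Or.inl rfl
        · exact Or.inr ⟨i', List.mem_cons_of_mem _ hi', h⟩
      · intro i' hi'
        rcases List.mem_cons.mp hi' with rfl | hi'
        · exact ⟨w, hmv, by omega⟩
        · exact ih3 i' hi'
      · intro T hT hall
        obtain ⟨w', hw', hwT⟩ := hall i List.mem_cons_self
        rw [hmv] at hw'
        injection hw' with hw'
        exact ih4 T (by split_ifs <;> omega) (fun i' hi' => hall i' (List.mem_cons_of_mem _ hi'))

-- the for-else pre-check when 1 ≤ mj ≤ len: no wraparound, it reads stones[len-mj .. len-1]
theorem pvCheckA_iff_small (stones : List Int) (mj : Int) (h1 : 1 ≤ mj)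
    (h2 : mj ≤ (stones.length : Int)) :
    ((PySem.List.pyRange ((stones.length : Int) - mj) (stones.length : Int) 1).all
      (fun i => PySem.List.pyGet? stones i == some (-1)) = true) ↔ pvWindowNeg1 stones mj := by
  rw [List.all_eq_true]
  constructor
  · intro h j hjm hjge
    rw [List.mem_range] at hjm
    have := h (j : Int) (PySem.List.mem_pyRange_one.mpr ⟨hjge, by omega⟩)
    rw [beq_iff_eq, PySem.List.pyGet?_natCast, List.getElem?_eq_getElem hjm] at this
    injection this with this
    rw [List.getD_eq_getElem stones 0 hjm]
    exact this
  · intro h i him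
    obtain ⟨hi1, hi2⟩ := PySem.List.mem_pyRange_one.mp him
    have hi0 : 0 ≤ i := by omega
    have hilt : i.toNat < stones.length := by omega
    rw [beq_iff_eq, PySem.List.pyGet?_eq_some_getElem stones hi0 hi2]
    have := h i.toNat (List.mem_range.mpr hilt) (by omega)
    rw [List.getD_eq_getElem stones 0 hilt] at this
    rw [this]

-- the pre-check when len+1 ≤ mj ≤ 2*len: negative indices wrap, so it scans ALL positions
theorem pvCheckA_iff_big (stones : List Int) (mj : Int) (hne : stones ≠ [])
    (h1 : (stones.length : Int) + 1 ≤ mj) (h2 : mj ≤ 2 * (stones.length : Int)) :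
    ((PySem.List.pyRange ((stones.length : Int) - mj) (stones.length : Int) 1).all
      (fun i => PySem.List.pyGet? stones i == some (-1)) = true) ↔ ∀ v ∈ stones, v = -1 := by
  have hn1 : 1 ≤ stones.length := List.length_pos_iff.mpr hne
  rw [List.all_eq_true]
  constructor
  · intro h v hv
    obtain ⟨j, hj, rfl⟩ := List.mem_iff_getElem.mp hv
    have := h (j : Int) (PySem.List.mem_pyRange_one.mpr ⟨by omega, by omega⟩)
    rw [beq_iff_eq, PySem.List.pyGet?_natCast, List.getElem?_eq_getElem hj] at this
    injection this
  · intro h i him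
    obtain ⟨hi1, hi2⟩ := PySem.List.mem_pyRange_one.mp him
    rw [beq_iff_eq]
    by_cases hi0 : 0 ≤ i
    · rw [PySem.List.pyGet?_eq_some_getElem stones hi0 hi2]
      rw [h _ (List.getElem_mem (by omega))]
    · obtain ⟨k, hk⟩ : ∃ k : Nat, i = -(k : Int) := ⟨(-i).toNat, by omega⟩
      have hk1 : 0 < k := by omega
      have hk2 : k ≤ stones.length := by omega
      rw [hk, PySem.List.pyGet?_neg_natCast stones k hk1 hk2,
        List.getElem?_eq_getElem (by omega : stones.length - k < stones.length)]
      rw [h _ (List.getElem_mem _)]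

theorem pvLoopA_finds (stones : List Int) (mj a : Int)
    (hQa : pvCrossA stones mj a (stones.length + 2) (-1) = true)
    (hmin : ∀ t, t < a → pvCrossA stones mj t (stones.length + 2) (-1) = false) :
    ∀ (b : Nat) (t0 : Int), t0 ≤ a → a < t0 + b → pvLoopA stones mj b t0 = a := by
  intro b
  induction b with
  | zero => intro t0 h1 h2; exfalso; push_cast at h2; omega
  | succ b ih =>
    intro t0 h1 h2
    by_cases h : t0 = a
    · subst h; simp only [pvLoopA, hQa, if_true]
    · have hlt : t0 < a := by omega
      simp only [pvLoopA, hmin t0 hlt]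
      simp only [Bool.false_eq_true, if_false]
      exact ih (t0 + 1) (by omega) (by push_cast at h2 ⊢; omega)

-- ===== VERDICT (by name: the statement is the Claim_ definition above) =====

theorem minimum_time_to_cross_spec : Claim_unchanged_minimum_time_to_cross := by
  intro stones mj hDom hPre hnD
  show minimum_time_to_cross stones mj = minimum_time_to_cross_alt stones mj
  rcases hPre with hmj | ⟨hmj1, hne, hmjn, hcw⟩
  · -- max_jump ≤ 0: A's for-else window is empty, B's first branch fires
    rw [minimum_time_to_cross, minimum_time_to_cross_alt,
      PySem.List.pyRange_one_eq_nil (by omega)]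
    simp [hmj]
  · have hn1 : 1 ≤ stones.length := List.length_pos_iff.mpr hne
    have hMfacts := PySem.List.le_foldl_max stones (0 : Int)
    set M : Int := stones.foldl max 0 with hMdef
    have hM0 : 0 ≤ M := hMfacts.1
    have hMub : ∀ v ∈ stones, v ≤ M := hMfacts.2
    by_cases hEq : (stones.length : Int) < mj
    · -- max_jump > n: the pre-check scans every position (wraparound); bank jump clears the river
      by_cases hAll : ∀ v ∈ stones, v = -1
      · -- all stones are -1: this is exactly D_, excluded by hnD
        exact absurd ⟨hne, by omega, by omega, hAll⟩ hnD
      · have hchk : ¬ ((PySem.List.pyRange ((stones.length : Int) - mj) (stones.length : Int) 1).all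
            (fun i => PySem.List.pyGet? stones i == some (-1)) = true) :=
          fun h => hAll ((pvCheckA_iff_big stones mj hne (by omega) (by omega)).mp h)
        rw [minimum_time_to_cross, if_neg hchk]
        have hcr : pvCrossA stones mj 0 (stones.length + 2) (-1) = true := by
          show pvCrossA stones mj 0 ((stones.length + 1) + 1) (-1) = true
          simp only [pvCrossA]
          rw [if_pos (by omega)]
        rw [minimum_time_to_cross_alt]
        simp only [if_neg (by omega : ¬ mj ≤ 0), if_pos hEq]
        show pvLoopA stones mj (M.toNat + 1 + 1) 0 = 0
        simp only [pvLoopA]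
        rw [if_pos hcr]
    · -- 1 ≤ max_jump ≤ n
      set mjn : Nat := mj.toNat with hmjndef
      have hmjc : (mjn : Int) = mj := Int.toNat_of_nonneg (by omega)
      have hmjn1 : 1 ≤ mjn := by omega
      have hBeq : minimum_time_to_cross_alt stones mj =
          pvAnsLoop mjn (pvPreList stones mjn) (pvSufList stones mjn)
            (List.range (stones.length - mjn + 1)) 0 := by
        rw [minimum_time_to_cross_alt]
        simp only [if_neg (by omega : ¬ mj ≤ 0), if_neg hEq]
        rfl
      have hwin_mem : ∀ i ∈ List.range (stones.length - mjn + 1), i + mjn ≤ stones.length := by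
        intro i hi
        rw [List.mem_range] at hi
        omega
      by_cases hW : pvWindowNeg1 stones mj
      · -- the last window has no steppable stone: A pre-check fires, B's loop hits None
        have hchk := (pvCheckA_iff_small stones mj hmj1 (by omega)).mpr hW
        rw [minimum_time_to_cross, if_pos hchk, hBeq]
        have hnone : pvMn ((pvSufList stones mjn).getD (stones.length - mjn) none)
            ((pvPreList stones mjn).getD (stones.length - mjn + mjn - 1) none) = none := by
          cases hmv : pvMn ((pvSufList stones mjn).getD (stones.length - mjn) none)
              ((pvPreList stones mjn).getD (stones.length - mjn + mjn - 1) none) with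
          | none => rfl
          | some w =>
            exfalso
            have hwin := (pvWm_iff stones mjn hmjn1 (stones.length - mjn) (by omega) w).mp
              ⟨w, hmv, le_refl _⟩
            obtain ⟨k, hk1, hk2, hk3, hOK0, -⟩ := hwin
            have := hW k (List.mem_range.mpr hk3) (by omega)
            omega
        exact (pvAnsLoop_none mjn (pvPreList stones mjn) (pvSufList stones mjn)
          (List.range (stones.length - mjn + 1)) 0
          ⟨stones.length - mjn, List.mem_range.mpr (by omega), hnone⟩).symm
      · -- crossable: A's loop finds the least feasible time, B computes it as a max of window minima
        have hC : pvCrossable stones mj := hcw.resolve_right hW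
        have hchk : ¬ ((PySem.List.pyRange ((stones.length : Int) - mj) (stones.length : Int) 1).all
            (fun i => PySem.List.pyGet? stones i == some (-1)) = true) :=
          fun h => hW ((pvCheckA_iff_small stones mj hmj1 (by omega)).mp h)
        rw [minimum_time_to_cross, if_neg hchk, hBeq]
        have hWinSome : ∀ i ∈ List.range (stones.length - mjn + 1),
            pvMn ((pvSufList stones mjn).getD i none)
              ((pvPreList stones mjn).getD (i + mjn - 1) none) ≠ none := by
          intro i hi
          have hiw := hwin_mem i hi
          obtain ⟨j, hjr, hij, hjlt, hj0⟩ := hC i (List.mem_range.mpr (by omega)) (by omega)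
          rw [List.mem_range] at hjr
          have hwin : pvWin stones mjn i (stones.getD j 0) :=
            ⟨j, hij, by omega, hjr, hj0, le_refl _⟩
          obtain ⟨w, hw, -⟩ := (pvWm_iff stones mjn hmjn1 i hiw (stones.getD j 0)).mpr hwin
          rw [hw]
          simp
        obtain ⟨hL1, hL2, hL3, hL4⟩ := pvAnsLoop_spec mjn (pvPreList stones mjn)
          (pvSufList stones mjn) (List.range (stones.length - mjn + 1)) 0 hWinSome
        set a : Int := pvAnsLoop mjn (pvPreList stones mjn) (pvSufList stones mjn)
          (List.range (stones.length - mjn + 1)) 0 with hadef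
        have hGoalIff : ∀ T : Int, pvGoal stones mj T ↔
            ∀ i ∈ List.range (stones.length - mjn + 1),
              pvLE (pvMn ((pvSufList stones mjn).getD i none)
                ((pvPreList stones mjn).getD (i + mjn - 1) none)) T := by
          intro T
          constructor
          · rintro ⟨p, hri, hp⟩ i hi
            have hiw := hwin_mem i hi
            rw [pvWm_iff stones mjn hmjn1 i hiw T]
            exact pvRI_hits stones hmj1 hri i (by omega)
          · intro h
            have hC' : ∀ i : Nat, (i : Int) + mj ≤ (stones.length : Int) →
                pvWin stones mj.toNat i T := by
              intro i hi
              exact (pvWm_iff stones mjn hmjn1 i (by omega) T).mp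
                (h i (List.mem_range.mpr (by omega)))
            exact pvWin_goal stones mj T hmj1 hC' stones.length (-1) (le_refl _)
              pvRI.start (by omega)
        have hGa : pvGoal stones mj a := (hGoalIff a).mpr hL3
        have hamin : ∀ t : Int, t < a → ¬ pvGoal stones mj t := by
          intro t ht hg
          by_cases ht0 : 0 ≤ t
          · exact absurd (hL4 t ht0 ((hGoalIff t).mp hg)) (by omega)
          · obtain ⟨p, hri, hp⟩ := hg
            have hpm1 : p ≠ -1 := by intro hh; subst hh; omega
            obtain ⟨u, -, hu0, huT, -⟩ := pvRI_inv hri hpm1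
            omega
        have ha0 : 0 ≤ a := hL1
        have haM : a ≤ M := by
          rcases hL2 with h | ⟨i, hi, h⟩
          · omega
          · have hiw := hwin_mem i hi
            rcases pvMn_cases ((pvSufList stones mjn).getD i none)
                ((pvPreList stones mjn).getD (i + mjn - 1) none) with hc | hc
            · rw [hc] at h
              obtain ⟨-, k, hk, hkv⟩ :=
                ((pvSufList_spec stones mjn hmjn1).2 i (by omega)).2 a h
              rw [hkv, List.getD_eq_getElem stones 0 hk]
              exact hMub _ (List.getElem_mem hk)
            · rw [hc] at h
              obtain ⟨-, k, hk, hkv⟩ :=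
                ((pvPreList_spec stones mjn hmjn1).2 (i + mjn - 1) (by omega)).2 a h
              rw [hkv, List.getD_eq_getElem stones 0 hk]
              exact hMub _ (List.getElem_mem hk)
        have hQiff : ∀ t : Int,
            (pvCrossA stones mj t (stones.length + 2) (-1) = true ↔ pvGoal stones mj t) := by
          intro t
          rw [pvCrossA_iff stones mj t (stones.length + 2) (-1) (le_refl _) (by omega)
            (by push_cast; omega), pvSuf_neg_one_iff]
        have hA : pvLoopA stones mj (M.toNat + 2) 0 = a :=
          pvLoopA_finds stones mj a ((hQiff a).mpr hGa)
            (fun t ht => Bool.eq_false_iff.mpr (fun h => hamin t ht ((hQiff t).mp h)))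
            (M.toNat + 2) 0 ha0 (by push_cast; omega)
        exact hA

theorem minimum_time_to_cross_changed : Claim_changed_minimum_time_to_cross := by
  unfold Claim_changed_minimum_time_to_cross; decide
theorem minimum_time_to_cross_tight : Claim_exact_minimum_time_to_cross := by
  intro stones mj hDom hPre hD
  obtain ⟨hne, hge, hle, hAll⟩ := hD
  have hn1 : 1 ≤ stones.length := List.length_pos_iff.mpr hne
  have hchk := (pvCheckA_iff_big stones mj hne hge hle).mpr hAll
  have hA : minimum_time_to_cross stones mj = -1 := by
    rw [minimum_time_to_cross, if_pos hchk]
  have hB : minimum_time_to_cross_alt stones mj = 0 := by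
    rw [minimum_time_to_cross_alt]
    simp only [if_neg (by omega : ¬ mj ≤ 0), if_pos (by omega : (stones.length : Int) < mj)]
  rw [hA, hB]
  omega
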